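-- pv_equiv track=rewrite | github.com/ParasAvkirkar/SpeechWork | command_notes.py | find_note_content
-- ===== SOURCE A (Python) =====
-- def find_note_content(text_spoke):
-- 	is_name_tag_found = False
-- 	content = ''
-- 	for word in text_spoke.split():
-- 		if is_name_tag_found:
-- 			content = content + word + ' '
-- 		if 'name' in word:
-- 			is_name_tag_found = True
--
-- 	return content
-- ===== SOURCE B (Python) =====
-- def find_note_content(text_spoke):
--     words = text_spoke.split()
--     for i, w in enumerate(words):
--         if 'name' in w:
--             rest = words[i + 1:]
--             return ' '.join(rest) + ' ' if rest else ''
--     return ''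
-- ===== Notes on version B (the rewrite author's own statement) =====
-- stated objective: simpler
-- what changed: Instead of a flag-carrying accumulator loop that concatenates word by word, B locates the first word containing 'name' and builds the result in one step from the tail slice with ' '.join (plus the trailing space A's per-word concatenation produces).
import Mathlib
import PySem

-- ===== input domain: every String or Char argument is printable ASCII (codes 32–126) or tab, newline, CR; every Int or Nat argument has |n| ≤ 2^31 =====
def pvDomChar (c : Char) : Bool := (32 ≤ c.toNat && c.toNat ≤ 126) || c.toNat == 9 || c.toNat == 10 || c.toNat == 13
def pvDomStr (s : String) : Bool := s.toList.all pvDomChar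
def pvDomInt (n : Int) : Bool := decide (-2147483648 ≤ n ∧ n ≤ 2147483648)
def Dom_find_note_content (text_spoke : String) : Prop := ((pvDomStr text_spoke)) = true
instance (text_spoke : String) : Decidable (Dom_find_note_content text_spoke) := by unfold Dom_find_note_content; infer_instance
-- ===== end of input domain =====

-- B replaces A's flag-carrying accumulator loop by find-the-sentinel-then-join-the-tail; objective: simpler.

-- ===== PORT A =====
-- flag/content state threaded through the word loop, exactly A's statement order
def find_note_content (text_spoke : String) : String :=
  let r := (PySem.Str.split₀ text_spoke).foldl
    (fun (st : Bool × String) word =>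
      let content := if st.1 then st.2 ++ word ++ " " else st.2
      let flag := if PySem.Str.isIn "name" word then true else st.1
      (flag, content)) (false, "")
  r.2

-- ===== PORT B =====
def find_note_content_alt (text_spoke : String) : String :=
  let words := PySem.Str.split₀ text_spoke
  match words.findIdx? (fun w => PySem.Str.isIn "name" w) with
  | none => ""
  | some i =>
      let rest := words.drop (i + 1)
      if rest = [] then "" else PySem.Str.join " " rest ++ " "

-- ===== PRECONDITION & SPEC =====
def Spec_find_note_content (text_spoke : String) (out : String) : Prop := out = find_note_content_alt text_spoke
instance (text_spoke : String) (out : String) : Decidable (Spec_find_note_content text_spoke out) := by unfold Spec_find_note_content; infer_instance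

-- ===== CLAIM (what is proved, stated in full; the proofs are below) =====
def Claim_equal_find_note_content : Prop := ∀ (text_spoke : String), Dom_find_note_content text_spoke → Spec_find_note_content text_spoke (find_note_content text_spoke)

-- ===== LEMMAS AND PROOFS =====

-- the step function of A's loop
def pvStep (st : Bool × String) (word : String) : Bool × String :=
  let content := if st.1 then st.2 ++ word ++ " " else st.2
  let flag := if PySem.Str.isIn "name" word then true else st.1
  (flag, content)

-- 'each word followed by a space', what A accumulates once the flag is set
def pvSuffix : List String → String
  | [] => ""
  | w :: t => w ++ " " ++ pvSuffix t

theorem pvFold_true (l : List String) (c : String) :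
    (l.foldl pvStep (true, c)).2 = c ++ pvSuffix l := by
  induction l generalizing c with
  | nil => simp [pvSuffix]
  | cons w t ih =>
      simp only [List.foldl, pvStep, pvSuffix]
      rw [show (if PySem.Str.isIn "name" w then true else true) = true by split <;> rfl]
      rw [ih]
      simp [String.append_assoc]

theorem pvFold_false (l : List String) (c : String) :
    (l.foldl pvStep (false, c)).2 =
      c ++ (match l.findIdx? (fun w => PySem.Str.isIn "name" w) with
            | none => ""
            | some i => pvSuffix (l.drop (i + 1))) := by
  induction l generalizing c with
  | nil => simp
  | cons w t ih =>
      by_cases h : PySem.Str.isIn "name" w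
      · simp only [List.foldl, pvStep, if_neg (Bool.false_ne_true), if_pos h]
        rw [pvFold_true, List.findIdx?_cons, h]
        simp
      · simp only [List.foldl, pvStep, if_neg (Bool.false_ne_true),
          if_neg h]
        rw [ih, List.findIdx?_cons]
        simp only [h, Bool.false_eq_true, if_false]
        cases hfi : t.findIdx? (fun w => PySem.Str.isIn "name" w) with
        | none => simp
        | some i => simp

theorem pvJoin_suffix (l : List String) (hne : l ≠ []) :
    PySem.Str.join " " l ++ " " = pvSuffix l := by
  induction l with
  | nil => exact absurd rfl hne
  | cons w t ih =>
      cases t with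
      | nil => simp [PySem.Str.join, pvSuffix]
      | cons w2 t2 =>
          rw [pvSuffix, ← ih (by simp)]
          rw [← String.toList_inj]
          simp [PySem.Str.join, PySem.Chars.join, List.intercalate,
            String.append_assoc]

-- ===== VERDICT (by name: the statement is the Claim_ definition above) =====
theorem find_note_content_spec : Claim_equal_find_note_content := by
  intro s _
  unfold Spec_find_note_content find_note_content find_note_content_alt
  show ((PySem.Str.split₀ s).foldl pvStep (false, "")).2 = _
  rw [pvFold_false]
  cases h : (PySem.Str.split₀ s).findIdx? (fun w => PySem.Str.isIn "name" w) with
  | none => simp only [h]; rfl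
  | some i =>
      simp only [h]
      by_cases hd : (PySem.Str.split₀ s).drop (i + 1) = []
      · rw [if_pos hd, hd]; rfl
      · rw [if_neg hd, pvJoin_suffix _ hd]
        simp
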